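-- pv_equiv track=rewrite | github.com/eduarsh/EcoDeco | algebraMatrix.py | matrixLow
-- ===== SOURCE A (Python) =====
-- def matrixLow(matrix,NumRow,NumCol):
--     #TO CHECK
--     mat=[]
--     for r in range(NumRow):
--         row=[]
--         for c in range (NumCol):
--             if(c<r):
--                 row.append(matrix[r][c])
--             else:
--                 row.append(0)
--         mat.append(row)
--     return mat
-- ===== SOURCE B (Python) =====
-- def matrixLow(matrix, NumRow, NumCol):
--     width = max(NumCol, 0)
--     mat = []
--     for r in range(NumRow):
--         k = min(r, NumCol)
--         head = list(matrix[r][:k]) if k > 0 else []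
--         mat.append(head + [0] * (width - len(head)))
--     return mat
-- ===== Notes on version B (the rewrite author's own statement) =====
-- stated objective: simpler
-- what changed: Replaces the inner column loop with per-element comparison by a single slice of the strictly-lower part of the row plus zero padding.
import Mathlib
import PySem

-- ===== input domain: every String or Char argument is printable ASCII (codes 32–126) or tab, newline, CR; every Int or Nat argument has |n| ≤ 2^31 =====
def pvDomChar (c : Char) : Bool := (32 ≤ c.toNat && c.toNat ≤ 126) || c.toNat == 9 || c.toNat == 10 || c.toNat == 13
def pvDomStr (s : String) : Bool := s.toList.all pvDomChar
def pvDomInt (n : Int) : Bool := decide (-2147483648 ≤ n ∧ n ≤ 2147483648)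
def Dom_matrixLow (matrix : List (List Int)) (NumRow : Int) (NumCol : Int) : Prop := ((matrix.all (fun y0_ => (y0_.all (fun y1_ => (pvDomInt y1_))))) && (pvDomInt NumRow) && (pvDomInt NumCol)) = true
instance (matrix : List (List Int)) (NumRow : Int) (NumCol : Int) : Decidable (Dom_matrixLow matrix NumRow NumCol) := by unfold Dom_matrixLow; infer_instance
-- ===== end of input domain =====

-- B replaces the inner column loop (element-by-element c<r test) by one slice of the
-- strictly-lower part of the row plus zero padding; equivalence is proved on Pre_.

-- ===== PORT A =====
def matrixLow (matrix : List (List Int)) (NumRow : Int) (NumCol : Int) : List (List Int) :=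
  (PySem.List.pyRange 0 NumRow 1).foldl (fun mat r =>
    mat ++ [ (PySem.List.pyRange 0 NumCol 1).foldl (fun row c =>
      row ++ [ if c < r then PySem.List.pyGetD (PySem.List.pyGetD matrix r []) c 0 else 0 ]) [] ]) []

-- ===== PORT B =====
def matrixLow_alt (matrix : List (List Int)) (NumRow : Int) (NumCol : Int) : List (List Int) :=
  let width := (max NumCol 0).toNat
  (PySem.List.pyRange 0 NumRow 1).foldl (fun mat r =>
    let k := min r NumCol
    let head := if 0 < k then PySem.List.slice (PySem.List.pyGetD matrix r []) none (some k) else []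
    mat ++ [ head ++ List.replicate (width - head.length) 0 ]) []

-- ===== PRECONDITION & SPEC =====
-- Pre_ excludes exactly the inputs where A raises IndexError: some needed row r (with
-- 0 < min r NumCol) is missing or shorter than its strictly-lower part.
def Pre_matrixLow (matrix : List (List Int)) (NumRow : Int) (NumCol : Int) : Prop :=
  (2 ≤ NumRow ∧ 1 ≤ NumCol → NumRow ≤ (matrix.length : Int)) ∧
  (∀ p ∈ matrix.zipIdx, 1 ≤ (p.2 : Int) ∧ (p.2 : Int) < NumRow ∧ 1 ≤ NumCol →
     min (p.2 : Int) NumCol ≤ (p.1.length : Int))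
instance (matrix : List (List Int)) (NumRow : Int) (NumCol : Int) : Decidable (Pre_matrixLow matrix NumRow NumCol) := by unfold Pre_matrixLow; infer_instance

def pvWitness_matrixLow : List (List Int) × Int × Int := ([[1, 2], [3, 4]], 2, 2)

def Spec_matrixLow (matrix : List (List Int)) (NumRow : Int) (NumCol : Int) (out : List (List Int)) : Prop := out = matrixLow_alt matrix NumRow NumCol
instance (matrix : List (List Int)) (NumRow : Int) (NumCol : Int) (out : List (List Int)) : Decidable (Spec_matrixLow matrix NumRow NumCol out) := by unfold Spec_matrixLow; infer_instance

-- ===== CLAIM (what is proved, stated in full; the proofs are below) =====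
def Claim_equal_matrixLow : Prop := ∀ (matrix : List (List Int)) (NumRow : Int) (NumCol : Int), Dom_matrixLow matrix NumRow NumCol → Pre_matrixLow matrix NumRow NumCol → Spec_matrixLow matrix NumRow NumCol (matrixLow matrix NumRow NumCol)

-- ===== LEMMAS AND PROOFS =====

-- One row: A's element-wise inner loop equals B's slice-plus-padding, given the
-- strictly-lower part fits in the row.
theorem row_eq (row : List Int) (r NumCol : Int) (hr : 0 ≤ r)
    (hlen : (min r NumCol).toNat ≤ row.length) :
    (PySem.List.pyRange 0 NumCol 1).map (fun c => if c < r then PySem.List.pyGetD row c 0 else 0)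
      = (if 0 < min r NumCol then PySem.List.slice row none (some (min r NumCol)) else []) ++
        List.replicate ((max NumCol 0).toNat -
          (if 0 < min r NumCol then PySem.List.slice row none (some (min r NumCol)) else []).length) 0 := by
  have hhead : (if 0 < min r NumCol then PySem.List.slice row none (some (min r NumCol)) else [])
      = row.take (min r NumCol).toNat := by
    split_ifs with h
    · exact PySem.List.slice_to row (le_of_lt h)
    · have : (min r NumCol).toNat = 0 := by omega
      simp [this]
  rw [hhead, PySem.List.pyRange_one]
  have hkn : (min r NumCol).toNat ≤ (max NumCol 0).toNat := by omega
  have hlen2 : (row.take (min r NumCol).toNat).length = (min r NumCol).toNat := by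
    simp [hlen]
  apply List.ext_getElem
  · simp [hlen, hkn]; omega
  · intro i h1 h2
    have hi : i < (max NumCol 0).toNat := by simp at h1; omega
    simp only [List.getElem_map, List.getElem_range]
    by_cases hik : i < (min r NumCol).toNat
    · have hcr : (0 : Int) + (i : Int) < r := by omega
      rw [List.getElem_append_left (by omega)]
      simp [List.getElem_take, PySem.List.pyGetD_natCast,
        List.getD_eq_getElem?_getD, List.getElem?_eq_getElem (by omega : i < row.length)]
      intro h; exact absurd h (by omega)
    · have hcr : ¬ ((0 : Int) + (i : Int) < r) := by omega
      rw [List.getElem_append_right (by omega)]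
      simp
      intro h; exact absurd h (by omega)

-- ===== VERDICT (by name: the statement is the Claim_ definition above) =====
theorem matrixLow_spec : Claim_equal_matrixLow := by
  intro matrix NumRow NumCol _ hpre
  unfold Spec_matrixLow matrixLow matrixLow_alt
  rw [PySem.List.foldl_append_singleton_eq_map, PySem.List.foldl_append_singleton_eq_map]
  simp only [List.nil_append]
  apply List.map_congr_left
  intro r hrmem
  have hr0 : 0 ≤ r ∧ r < NumRow := (PySem.List.mem_pyRange_one).1 hrmem
  rw [PySem.List.foldl_append_singleton_eq_map]
  simp only [List.nil_append]
  apply row_eq _ _ _ hr0.1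
  by_cases hk : 0 < min r NumCol
  · have h1 : 1 ≤ r ∧ 1 ≤ NumCol := by omega
    have hlt : r < (matrix.length : Int) := by
      have := hpre.1 ⟨by omega, h1.2⟩
      omega
    have h2 := (List.forall_mem_zipIdx'.mp hpre.2) r.toNat (by omega)
    have hcast : ((r.toNat : Nat) : Int) = r := Int.toNat_of_nonneg hr0.1
    rw [hcast] at h2
    have h3 : min r NumCol ≤ (matrix[r.toNat].length : Int) := h2 ⟨h1.1, hr0.2, h1.2⟩
    rw [PySem.List.pyGetD_eq_getElem matrix [] hr0.1 hlt]
    omega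
  · omega
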